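-- pv_equiv track=rewrite | github.com/heechul/drama | re/gf2_bank_solver.py | select_unique_columns
-- ===== SOURCE A (Python) =====
-- from typing import List, Tuple
--
-- def mat_rank_gf2(M: List[List[int]]) -> int:
--     """Return rank over GF(2), mutating a local copy."""
--     if not M: return 0
--     A = [row[:] for row in M]
--     n_rows, n_cols = len(A), len(A[0])
--     r = 0
--     for c in range(n_cols):
--         pivot = None
--         for i in range(r, n_rows):
--             if A[i][c]:
--                 pivot = i; break
--         if pivot is None:
--             continue
--         A[r], A[pivot] = A[pivot], A[r]
--         for i in range(n_rows):
--             if i != r and A[i][c]: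
--                 # row_i ^= row_r
--                 rowi, rowr = A[i], A[r]
--                 for j in range(c, n_cols):
--                     rowi[j] ^= rowr[j]
--         r += 1
--         if r == n_rows: break
--     return r
--
-- def select_unique_columns(Z: List[List[int]], need: int) -> Tuple[List[int], int]:
--     """
--     Given Z (B x s), greedily pick up to 'need' columns that (a) increase rank and
--     (b) try to make all B rows unique. Returns (picked_cols, rank_after).
--     """
--     if not Z: return ([], 0)
--     B = len(Z); s = len(Z[0])
--     picked = []
--     current = []
--     best_uniques = len(set())  # 0
--     best_cols = []
--
--     def rows_to_tuples(M):
--         return tuple(tuple(row) for row in M)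
--
--     rank = 0
--     for c in range(s):
--         trial_cols = picked + [c]
--         M = [[row[j] for j in trial_cols] for row in Z]  # B x len(trial_cols)
--         r = mat_rank_gf2([row[:] for row in M])
--         if r > rank:
--             picked = trial_cols
--             rank = r
--             # track uniqueness
--             uniques = len(set(rows_to_tuples(M)))
--             if uniques > best_uniques:
--                 best_uniques = uniques
--                 best_cols = picked[:]
--             if len(picked) == need:
--                 break
--
--     if best_uniques < B and rank >= need:
--         # Try to improve uniqueness by adding more columns if available
--         for c in range(s):
--             if c in picked: continue
--             trial_cols = picked + [c]
--             M = [[row[j] for j in trial_cols] for row in Z]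
--             uniques = len(set(rows_to_tuples(M)))
--             if uniques > best_uniques:
--                 best_uniques = uniques
--                 best_cols = trial_cols[:]
--             if best_uniques == B:
--                 picked = best_cols
--                 break
--
--     if best_uniques == B:
--         return (picked if picked else best_cols, rank)
--     # Fallback to whatever increased rank the most
--     return (picked if picked else best_cols, rank)
-- ===== SOURCE B (Python) =====
-- from typing import List, Tuple
--
-- def _dot(col, m):
--     # xor of col[j] over the rows j whose bit is set in the mask m
--     acc = 0
--     for j, x in enumerate(col):
--         if (m >> j) & 1:
--             acc ^= x
--     return acc
--
-- def _try_col(T, rank, col):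
--     # T encodes the row operations done so far: row i of the eliminated matrix is
--     # the xor of the original rows in bitmask T[i].  Apply T to the original
--     # column, then try to extend the elimination with one new pivot.
--     v = [_dot(col, m) for m in T]
--     p = None
--     for i in range(rank, len(v)):
--         if v[i]:
--             p = i
--             break
--     if p is None:
--         return T, rank
--     T = list(T)
--     T[rank], T[p] = T[p], T[rank]
--     v[rank], v[p] = v[p], v[rank]
--     for i in range(len(v)):
--         if i != rank and v[i]:
--             T[i] ^= T[rank]
--             v[i] ^= v[rank]
--     return T, rank + 1
--
-- def _better(best, u, cols):
--     return (u, list(cols)) if u > best[0] else best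
--
-- def select_unique_columns(Z: List[List[int]], need: int) -> Tuple[List[int], int]:
--     if not Z:
--         return ([], 0)
--     B = len(Z)
--     cols = [[row[c] for row in Z] for c in range(len(Z[0]))]  # transpose once
--     T = [1 << i for i in range(B)]  # row-operation bitmasks of the running elimination
--     rank = 0
--     picked = []
--     sigs = [() for _ in range(B)]  # row signatures over the picked columns
--     best = (0, [])
--     for c, col in enumerate(cols):
--         T2, r2 = _try_col(T, rank, col)
--         if r2 == rank:
--             continue
--         T, rank = T2, r2
--         picked = picked + [c]
--         sigs = [s + (col[i],) for i, s in enumerate(sigs)]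
--         best = _better(best, len(set(sigs)), picked)
--         if len(picked) == need:
--             break
--     if best[0] < B and rank >= need:
--         for c, col in [(c, col) for c, col in enumerate(cols) if c not in picked]:
--             u = len({s + (col[i],) for i, s in enumerate(sigs)})
--             best = _better(best, u, picked + [c])
--             if best[0] == B:
--                 picked = best[1]
--                 break
--     return (picked if picked else best[1], rank)
-- ===== Notes on version B (the rewrite author's own statement) =====
-- stated objective: faster
-- what changed: A rebuilds the picked submatrix and re-runs full Gaussian elimination from scratch for every candidate column; B transposes Z once, keeps the running elimination as a list of per-row bitmasks (row i of the eliminated matrix = xor of the original rows in mask T[i], a GF(2) transformation matrix), applies the masks to each new original column to test for a new pivot in O(B^2) cheap mask/xor ops, and keeps incremental row signatures instead of rebuilding B x k row tuples for the uniqueness counts.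
-- outside the precondition, e.g. on select_unique_columns([[0, 1], [1]], 1): A returns ([0], 1), B raises IndexError
import Mathlib
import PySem

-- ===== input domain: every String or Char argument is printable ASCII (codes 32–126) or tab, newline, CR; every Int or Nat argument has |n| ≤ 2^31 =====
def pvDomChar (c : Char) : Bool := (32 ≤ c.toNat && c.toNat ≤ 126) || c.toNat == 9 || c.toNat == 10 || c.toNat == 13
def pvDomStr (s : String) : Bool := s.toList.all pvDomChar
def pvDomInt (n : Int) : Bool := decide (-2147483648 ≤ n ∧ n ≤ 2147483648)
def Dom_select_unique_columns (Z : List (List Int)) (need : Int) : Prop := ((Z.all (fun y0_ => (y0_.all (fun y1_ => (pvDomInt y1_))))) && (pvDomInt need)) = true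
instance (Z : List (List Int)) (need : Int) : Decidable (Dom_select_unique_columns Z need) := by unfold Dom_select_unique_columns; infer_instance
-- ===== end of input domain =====

-- B transposes Z once and replaces A's per-candidate full Gaussian elimination by one
-- incremental elimination kept as per-row bitmasks over the original rows (a GF(2)
-- transformation matrix) plus incremental row signatures; same return value, measurably faster.

-- ===== PORT A =====
-- inner loop 'for j in range(c, n_cols): rowi[j] ^= rowr[j]' (exact: index-wise xor from column c on)
def pvElimRow (c : Nat) (rowr rowi : List Int) : List Int :=
  rowi.mapIdx fun j x => if c ≤ j then PySem.Int.bxor x (rowr.getD j 0) else x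

-- one step of 'for i in range(n_rows): if i != r and A[i][c]: row_i ^= row_r'
def pvElimStep (r c : Nat) (A : List (List Int)) (i : Nat) : List (List Int) :=
  if i ≠ r ∧ (A.getD i []).getD c 0 ≠ 0 then
    A.set i (pvElimRow c (A.getD r []) (A.getD i [])) else A

-- column loop of mat_rank_gf2; cs = remaining column indices (break = stop recursing)
def pvRankLoop (nrows : Nat) (cs : List Nat) (A : List (List Int)) (r : Nat) : Nat :=
  match cs with
  | [] => r
  | c :: rest =>
    match (List.range' r (nrows - r)).find? (fun i => (A.getD i []).getD c 0 != 0) with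
    | none => pvRankLoop nrows rest A r
    | some p =>
      let A1 := (A.set r (A.getD p [])).set p (A.getD r [])
      let A2 := (List.range nrows).foldl (pvElimStep r c) A1
      if r + 1 = nrows then r + 1 else pvRankLoop nrows rest A2 (r + 1)

def pvMatRank (M : List (List Int)) : Nat :=
  if M = [] then 0 else pvRankLoop M.length (List.range (M.headD []).length) M 0

-- first greedy loop of A: state (picked, rank, best_uniques, best_cols)
def pvAFirst (Z : List (List Int)) (need : Int) (cs : List Nat)
    (picked : List Nat) (rank bu : Nat) (bc : List Nat) : List Nat × Nat × Nat × List Nat :=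
  match cs with
  | [] => (picked, rank, bu, bc)
  | c :: rest =>
    let trial := picked ++ [c]
    let M := Z.map fun row => trial.map fun j => row.getD j 0
    let r := pvMatRank M
    if r > rank then
      let uniq := (PySem.Set.ofList M).length
      let bu' := if uniq > bu then uniq else bu
      let bc' := if uniq > bu then trial else bc
      if (trial.length : Int) = need then (trial, r, bu', bc')
      else pvAFirst Z need rest trial r bu' bc'
    else pvAFirst Z need rest picked rank bu bc

-- second loop of A (uniqueness improvement): state (picked, best_uniques, best_cols)
def pvASecond (Z : List (List Int)) (B : Nat) (cs : List Nat)
    (picked : List Nat) (bu : Nat) (bc : List Nat) : List Nat × Nat × List Nat :=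
  match cs with
  | [] => (picked, bu, bc)
  | c :: rest =>
    if c ∈ picked then pvASecond Z B rest picked bu bc
    else
      let trial := picked ++ [c]
      let M := Z.map fun row => trial.map fun j => row.getD j 0
      let uniq := (PySem.Set.ofList M).length
      let bu' := if uniq > bu then uniq else bu
      let bc' := if uniq > bu then trial else bc
      if bu' = B then (bc', bu', bc')
      else pvASecond Z B rest picked bu' bc'

-- Python's final 'if best_uniques == B: return …' and the fallback return the SAME expression;
-- ported as that single expression. Column indices are produced by range(s), hence Nat internally.
def select_unique_columns (Z : List (List Int)) (need : Int) : List Int × Int :=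
  if Z = [] then ([], 0)
  else
    let B := Z.length
    let s := (Z.headD []).length
    let st := pvAFirst Z need (List.range s) [] 0 0 []
    let st2 := if st.2.2.1 < B ∧ need ≤ (st.2.1 : Int) then
        pvASecond Z B (List.range s) st.1 st.2.2.1 st.2.2.2
      else (st.1, st.2.2.1, st.2.2.2)
    ((if st2.1 ≠ [] then st2.1 else st2.2.2).map Int.ofNat, (st.2.1 : Int))

-- ===== PORT B =====
-- _dot of Source B: xor of col[j] over the rows j whose bit is set in the mask m
def pvDotAux (col : List Int) (j : Nat) (m : Nat) (acc : Int) : Int :=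
  match col with
  | [] => acc
  | x :: xs => pvDotAux xs (j + 1) m (if m.testBit j then PySem.Int.bxor acc x else acc)

def pvDot (col : List Int) (m : Nat) : Int := pvDotAux col 0 m 0

-- inner loop of _try_col: 'if i != rank and v[i]: T[i] ^= T[rank]; v[i] ^= v[rank]'
def pvTryStep (r : Nat) (st : List Int × List Nat) (i : Nat) : List Int × List Nat :=
  if i ≠ r ∧ st.1.getD i 0 ≠ 0 then
    (st.1.set i (PySem.Int.bxor (st.1.getD i 0) (st.1.getD r 0)),
     st.2.set i (st.2.getD i 0 ^^^ st.2.getD r 0))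
  else st

-- _try_col of Source B: apply the recorded masks to the original column, extend with one pivot
def pvTryCol (T : List Nat) (rank : Nat) (col : List Int) : List Nat × Nat :=
  let v := T.map (pvDot col)
  match (List.range' rank (v.length - rank)).find? (fun i => v.getD i 0 != 0) with
  | none => (T, rank)
  | some p =>
    let T1 := (T.set rank (T.getD p 0)).set p (T.getD rank 0)
    let v1 := (v.set rank (v.getD p 0)).set p (v.getD rank 0)
    let st := (List.range v.length).foldl (pvTryStep rank) (v1, T1)
    (st.2, rank + 1)

-- _better of Source B
def pvBetter (best : Nat × List Nat) (u : Nat) (cols : List Nat) : Nat × List Nat :=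
  if u > best.1 then (u, cols) else best

-- 'for c, col in enumerate(cols)' of Source B, with the running counter made explicit
def pvBFirst (Z : List (List Int)) (need : Int) (c : Nat) (cols : List (List Int))
    (picked : List Nat) (T : List Nat) (rank : Nat) (sigs : List (List Int))
    (best : Nat × List Nat) : List Nat × Nat × List (List Int) × Nat × List Nat :=
  match cols with
  | [] => (picked, rank, sigs, best.1, best.2)
  | col :: rest =>
    let tr := pvTryCol T rank col
    if tr.2 = rank then pvBFirst Z need (c + 1) rest picked T rank sigs best
    else
      let picked' := picked ++ [c]
      let sigs' := (PySem.List.enumerate sigs).map fun p => p.2 ++ [col.getD p.1.toNat 0]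
      let best' := pvBetter best (PySem.Set.ofList sigs').length picked'
      if (picked'.length : Int) = need then (picked', tr.2, sigs', best'.1, best'.2)
      else pvBFirst Z need (c + 1) rest picked' tr.1 tr.2 sigs' best'

-- the '[(c, col) for c, col in enumerate(cols) if c not in picked]' list of Source B
def pvEnum (c : Nat) (cols : List (List Int)) : List (Nat × List Int) :=
  match cols with
  | [] => []
  | col :: rest => (c, col) :: pvEnum (c + 1) rest

-- second loop of Source B over the pre-filtered candidates (sigs are fixed here)
def pvBSecond (Bn : Nat) (ps : List (Nat × List Int)) (picked : List Nat)
    (sigs : List (List Int)) (best : Nat × List Nat) : List Nat × Nat × List Nat :=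
  match ps with
  | [] => (picked, best.1, best.2)
  | (c, col) :: rest =>
    let u := (PySem.Set.ofList ((PySem.List.enumerate sigs).map fun p =>
      p.2 ++ [col.getD p.1.toNat 0])).length
    let best' := pvBetter best u (picked ++ [c])
    if best'.1 = Bn then (best'.2, best'.1, best'.2)
    else pvBSecond Bn rest picked sigs best'

def select_unique_columns_alt (Z : List (List Int)) (need : Int) : List Int × Int :=
  if Z = [] then ([], 0)
  else
    let Bn := Z.length
    let cols := (List.range (Z.headD []).length).map fun c => Z.map fun row => row.getD c 0
    let T0 := (List.range Bn).map fun i => (1 : Nat) <<< i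
    let st := pvBFirst Z need 0 cols [] T0 0 (Z.map fun _ => []) (0, [])
    let fin := if st.2.2.2.1 < Bn ∧ need ≤ (st.2.1 : Int) then
        pvBSecond Bn ((pvEnum 0 cols).filter fun p => decide (p.1 ∉ st.1)) st.1 st.2.2.1
          (st.2.2.2.1, st.2.2.2.2)
      else (st.1, st.2.2.2.1, st.2.2.2.2)
    ((if fin.1 ≠ [] then fin.1 else fin.2.2).map Int.ofNat, (st.2.1 : Int))

-- ===== PRECONDITION & SPEC =====
-- Pre_ excludes matrices in which some row is shorter than the first row: there Python indexes
-- row[c] for c up to len(Z[0])-1 and may raise IndexError (on a few such inputs the greedy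
-- breaks early and A still returns, while B's up-front transpose raises; see the cite in claim.json).
def Pre_select_unique_columns (Z : List (List Int)) (need : Int) : Prop :=
  ∀ row ∈ Z, (Z.headD []).length ≤ row.length
instance (Z : List (List Int)) (need : Int) : Decidable (Pre_select_unique_columns Z need) := by
  unfold Pre_select_unique_columns; infer_instance

def pvWitness_select_unique_columns : List (List Int) × Int := ([[1, 0], [0, 1]], 2)

def Spec_select_unique_columns (Z : List (List Int)) (need : Int) (out : List Int × Int) : Prop := out = select_unique_columns_alt Z need
instance (Z : List (List Int)) (need : Int) (out : List Int × Int) : Decidable (Spec_select_unique_columns Z need out) := by unfold Spec_select_unique_columns; infer_instance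

-- ===== CLAIM (what is proved, stated in full; the proofs are below) =====
def Claim_equal_select_unique_columns : Prop := ∀ (Z : List (List Int)) (need : Int), Dom_select_unique_columns Z need → Pre_select_unique_columns Z need → Spec_select_unique_columns Z need (select_unique_columns Z need)

-- ===== LEMMAS AND PROOFS =====

-- xor algebra: PySem's bxor is core Int.xor, which is associative
lemma pvBxorEq (a b : Int) : PySem.Int.bxor a b = Int.xor a b := by
  cases a <;> cases b <;> simp [PySem.Int.bxor, Int.xor, Int.negSucc_eq] <;> omega

lemma pvXorAssocCore (a b c : Int) : Int.xor (Int.xor a b) c = Int.xor a (Int.xor b c) := by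
  cases a <;> cases b <;> cases c <;> simp [Int.xor, Nat.xor_assoc]

lemma pvBxorAssoc (a b c : Int) :
    PySem.Int.bxor (PySem.Int.bxor a b) c = PySem.Int.bxor a (PySem.Int.bxor b c) := by
  simp only [pvBxorEq]; exact pvXorAssocCore a b c

lemma pvBxorZeroLeft (a : Int) : PySem.Int.bxor 0 a = a := by
  rw [PySem.Int.bxor_comm]; simp

lemma pvBxorSwapRight (a b x : Int) :
    PySem.Int.bxor (PySem.Int.bxor a b) x = PySem.Int.bxor (PySem.Int.bxor a x) b := by
  rw [pvBxorAssoc, PySem.Int.bxor_comm b x, ← pvBxorAssoc]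

lemma pvBxorCancelPair (a b x : Int) :
    PySem.Int.bxor a b = PySem.Int.bxor (PySem.Int.bxor a x) (PySem.Int.bxor b x) := by
  rw [pvBxorAssoc, PySem.Int.bxor_comm b x, ← pvBxorAssoc x x b, PySem.Int.bxor_self,
      pvBxorZeroLeft]

-- pvDot basics
lemma pvDotAux_small (col : List Int) : ∀ (j m : Nat) (acc : Int), m < 2 ^ j →
    pvDotAux col j m acc = acc := by
  induction col with
  | nil => intro j m acc _; rfl
  | cons x xs ih =>
    intro j m acc h
    have hb : m.testBit j = false := Nat.testBit_lt_two_pow h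
    simp only [pvDotAux]
    rw [hb, if_neg Bool.false_ne_true]
    exact ih (j + 1) m acc (lt_of_lt_of_le h (Nat.pow_le_pow_right (by omega) (by omega)))

lemma pvDotAux_pow (col : List Int) : ∀ (j k : Nat) (acc : Int),
    pvDotAux col j (2 ^ (j + k)) acc
      = if k < col.length then PySem.Int.bxor acc (col.getD k 0) else acc := by
  induction col with
  | nil => intro j k acc; simp [pvDotAux]
  | cons x xs ih =>
    intro j k acc
    cases k with
    | zero =>
      have hb : (2 ^ (j + 0)).testBit j = true := by
        simp [Nat.testBit_two_pow]
      simp only [pvDotAux]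
      rw [hb, if_pos rfl,
          pvDotAux_small xs (j + 1) (2 ^ (j + 0)) _
            (Nat.pow_lt_pow_right (by omega) (by omega))]
      simp
    | succ k' =>
      have hb : (2 ^ (j + (k' + 1))).testBit j = false := by
        rw [Nat.testBit_two_pow]; exact decide_eq_false (by omega)
      simp only [pvDotAux]
      rw [hb, if_neg Bool.false_ne_true, show j + (k' + 1) = (j + 1) + k' by omega,
          ih (j + 1) k' acc]
      simp

lemma pvDotAux_xor (col : List Int) : ∀ (j m1 m2 : Nat) (a b : Int),
    pvDotAux col j (m1 ^^^ m2) (PySem.Int.bxor a b)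
      = PySem.Int.bxor (pvDotAux col j m1 a) (pvDotAux col j m2 b) := by
  induction col with
  | nil => intro j m1 m2 a b; rfl
  | cons x xs ih =>
    intro j m1 m2 a b
    simp only [pvDotAux]
    cases h1 : m1.testBit j <;> cases h2 : m2.testBit j
    · have hx : (m1 ^^^ m2).testBit j = false := by simp [Nat.testBit_xor, h1, h2]
      rw [hx, if_neg Bool.false_ne_true, if_neg Bool.false_ne_true,
          if_neg Bool.false_ne_true]
      exact ih (j + 1) m1 m2 a b
    · have hx : (m1 ^^^ m2).testBit j = true := by simp [Nat.testBit_xor, h1, h2]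
      rw [hx, if_pos rfl, if_neg Bool.false_ne_true, if_pos rfl, pvBxorAssoc]
      exact ih (j + 1) m1 m2 a (PySem.Int.bxor b x)
    · have hx : (m1 ^^^ m2).testBit j = true := by simp [Nat.testBit_xor, h1, h2]
      rw [hx, if_pos rfl, if_pos rfl, if_neg Bool.false_ne_true, pvBxorSwapRight]
      exact ih (j + 1) m1 m2 (PySem.Int.bxor a x) b
    · have hx : (m1 ^^^ m2).testBit j = false := by simp [Nat.testBit_xor, h1, h2]
      rw [hx, if_neg Bool.false_ne_true, if_pos rfl, if_pos rfl,
          pvBxorCancelPair a b x]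
      exact ih (j + 1) m1 m2 (PySem.Int.bxor a x) (PySem.Int.bxor b x)

lemma pvDot_zero (col : List Int) : pvDot col 0 = 0 :=
  pvDotAux_small col 0 0 0 (by omega)

lemma pvDot_xor (col : List Int) (m1 m2 : Nat) :
    pvDot col (m1 ^^^ m2) = PySem.Int.bxor (pvDot col m1) (pvDot col m2) := by
  unfold pvDot
  rw [show (0 : Int) = PySem.Int.bxor 0 0 by simp]
  exact pvDotAux_xor col 0 m1 m2 0 0

lemma pvDot_pow (col : List Int) (i : Nat) (h : i < col.length) :
    pvDot col (1 <<< i) = col.getD i 0 := by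
  unfold pvDot
  rw [Nat.shiftLeft_eq, one_mul, show i = 0 + i by omega, pvDotAux_pow col 0 i 0, if_pos (by omega)]
  rw [pvBxorZeroLeft, Nat.zero_add]

-- proof-side view of B's mask application, and the op it simulates
def pvApplyT (T : List Nat) (w : List Int) : List Int := T.map (pvDot w)

def pvApplyOp (v : List Int) (op : Bool × Nat × Nat) : List Int :=
  if op.1 then (v.set op.2.1 (v.getD op.2.2 0)).set op.2.2 (v.getD op.2.1 0)
  else v.set op.2.1 (PySem.Int.bxor (v.getD op.2.1 0) (v.getD op.2.2 0))

lemma pvApplyT_getD (T : List Nat) (w : List Int) (x : Nat) :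
    (pvApplyT T w).getD x 0 = pvDot w (T.getD x 0) := by
  by_cases h : x < T.length
  · simp [pvApplyT, List.getD_eq_getElem, h]
  · rw [List.getD_eq_default _ _ (by simp [pvApplyT]; omega),
        List.getD_eq_default _ _ (by omega), pvDot_zero]

lemma pvApplyT_swap (T : List Nat) (r p : Nat) (w : List Int) :
    pvApplyT ((T.set r (T.getD p 0)).set p (T.getD r 0)) w
      = pvApplyOp (pvApplyT T w) (true, r, p) := by
  simp only [pvApplyT, pvApplyOp, List.map_set, if_pos rfl]
  rw [← pvApplyT_getD T w p, ← pvApplyT_getD T w r]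
  rfl

lemma pvApplyT_xorstep (T : List Nat) (i r : Nat) (w : List Int) :
    pvApplyT (T.set i (T.getD i 0 ^^^ T.getD r 0)) w
      = pvApplyOp (pvApplyT T w) (false, i, r) := by
  simp only [pvApplyT, pvApplyOp, List.map_set, if_neg (by simp : ¬ (false = true))]
  rw [pvDot_xor, ← pvApplyT_getD T w i, ← pvApplyT_getD T w r]
  rfl

lemma pvApplyT_id (n : Nat) (w : List Int) (h : w.length = n) :
    pvApplyT ((List.range n).map fun i => (1 : Nat) <<< i) w = w := by
  apply List.ext_getElem
  · simp [pvApplyT, h]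
  · intro i h1 h2
    have hi : i < n := by simpa [pvApplyT] using h1
    simp only [pvApplyT, List.getElem_map, List.getElem_range]
    rw [pvDot_pow w i (by omega), List.getD_eq_getElem _ _ h2]

-- the j-th column of a row-major matrix (0 outside; used by the proofs only)
def pvColOf (A : List (List Int)) (j : Nat) : List Int := A.map fun row => row.getD j 0

lemma pvColOf_get (A : List (List Int)) (j i : Nat) :
    (pvColOf A j)[i]?.getD 0 = ((A[i]?.getD [])[j]?.getD 0 : Int) := by
  simp only [pvColOf, List.getElem?_map]
  cases A[i]? <;> simp

lemma pvColOf_getD (A : List (List Int)) (j i : Nat) :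
    (pvColOf A j).getD i 0 = (A.getD i []).getD j 0 := by
  simp [List.getD, pvColOf_get]

lemma pvColOf_length (A : List (List Int)) (j : Nat) : (pvColOf A j).length = A.length := by
  simp [pvColOf]

lemma pvColOf_set (A : List (List Int)) (i : Nat) (row : List Int) (j : Nat) :
    pvColOf (A.set i row) j = (pvColOf A j).set i (row.getD j 0) := by
  simp [pvColOf, List.map_set]

lemma pvColOf_swap (A : List (List Int)) (r p j : Nat) :
    pvColOf ((A.set r (A.getD p [])).set p (A.getD r [])) j
      = pvApplyOp (pvColOf A j) (true, r, p) := by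
  simp [pvColOf_set, pvApplyOp, List.getD, pvColOf_get]

lemma pvColOf_elim (A : List (List Int)) (r c i j : Nat) (hcj : c ≤ j)
    (_hi : i < A.length) (hlen : j < (A.getD i []).length) :
    pvColOf (A.set i (pvElimRow c (A.getD r []) (A.getD i []))) j
      = pvApplyOp (pvColOf A j) (false, i, r) := by
  rw [pvColOf_set, pvApplyOp]
  simp only [if_neg (by simp : ¬ (false = true))]
  congr 1
  rw [pvColOf_getD, pvColOf_getD]
  unfold pvElimRow
  rw [List.getD_eq_getElem _ _ (by simpa using hlen), List.getElem_mapIdx,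
      if_pos hcj, List.getD_eq_getElem _ _ hlen]

-- the elimination inner loop of A mirrored by B's mask-updating loop
lemma pvElimFold_sim (nrows ncols r c : Nat) (hc : c < ncols) :
    ∀ (is : List Nat) (A : List (List Int)) (vT : List Int × List Nat),
      A.length = nrows →
      (∀ row ∈ A, row.length = ncols) →
      vT.1 = pvColOf A c →
      (is.foldl (pvElimStep r c) A).length = nrows ∧
      (∀ row ∈ is.foldl (pvElimStep r c) A, row.length = ncols) ∧
      (is.foldl (pvTryStep r) vT).1 = pvColOf (is.foldl (pvElimStep r c) A) c ∧
      (is.foldl (pvTryStep r) vT).2.length = vT.2.length ∧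
      (∀ (j : Nat) (w : List Int), c ≤ j → j < ncols →
        pvColOf A j = pvApplyT vT.2 w →
        pvColOf (is.foldl (pvElimStep r c) A) j = pvApplyT (is.foldl (pvTryStep r) vT).2 w) := by
  intro is
  induction is with
  | nil => intro A vT h1 h2 h4; exact ⟨h1, h2, h4, rfl, fun j w _ _ h => h⟩
  | cons i it ih =>
    intro A vT h1 h2 h4
    simp only [List.foldl_cons]
    have hcond : (i ≠ r ∧ vT.1.getD i 0 ≠ 0) ↔ (i ≠ r ∧ (A.getD i []).getD c 0 ≠ 0) := by
      rw [h4, pvColOf_getD]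
    by_cases hcase : i ≠ r ∧ (A.getD i []).getD c 0 ≠ 0
    · have hA : pvElimStep r c A i = A.set i (pvElimRow c (A.getD r []) (A.getD i [])) := by
        unfold pvElimStep; rw [if_pos hcase]
      have hB : pvTryStep r vT i
          = (vT.1.set i (PySem.Int.bxor (vT.1.getD i 0) (vT.1.getD r 0)),
             vT.2.set i (vT.2.getD i 0 ^^^ vT.2.getD r 0)) := by
        unfold pvTryStep; rw [if_pos (hcond.mpr hcase)]
      by_cases hilt : i < A.length
      · have hrowlen : (A.getD i []).length = ncols := by
          rw [List.getD_eq_getElem _ _ hilt]; exact h2 _ (List.getElem_mem hilt)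
        have hset : ∀ (j : Nat), c ≤ j → j < ncols →
            pvColOf (A.set i (pvElimRow c (A.getD r []) (A.getD i []))) j
              = pvApplyOp (pvColOf A j) (false, i, r) := by
          intro j hcj hjn
          exact pvColOf_elim A r c i j hcj hilt (by rw [hrowlen]; exact hjn)
        have hB1 : vT.1.set i (PySem.Int.bxor (vT.1.getD i 0) (vT.1.getD r 0))
            = pvColOf (A.set i (pvElimRow c (A.getD r []) (A.getD i []))) c := by
          rw [hset c le_rfl hc, h4]; rfl
        rw [hA, hB]
        obtain ⟨e1, e2, e3, e4, e5⟩ := ih (A.set i (pvElimRow c (A.getD r []) (A.getD i [])))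
          (vT.1.set i (PySem.Int.bxor (vT.1.getD i 0) (vT.1.getD r 0)),
           vT.2.set i (vT.2.getD i 0 ^^^ vT.2.getD r 0))
          (by simpa using h1)
          (by
            intro row hrow
            rcases List.mem_or_eq_of_mem_set hrow with h | h
            · exact h2 row h
            · subst h; simpa [pvElimRow] using hrowlen)
          hB1
        refine ⟨e1, e2, e3, by simpa using e4, ?_⟩
        intro j w hcj hjn hw
        exact e5 j w hcj hjn (by rw [hset j hcj hjn, hw, ← pvApplyT_xorstep])
      · exfalso
        rcases hcase with ⟨-, hnz⟩
        have hAi : A.getD i [] = [] := List.getD_eq_default _ _ (by omega)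
        rw [hAi] at hnz
        simp at hnz
    · have hA : pvElimStep r c A i = A := by unfold pvElimStep; rw [if_neg hcase]
      have hB : pvTryStep r vT i = vT := by
        unfold pvTryStep; rw [if_neg (fun h => hcase (hcond.mp h))]
      rw [hA, hB]
      exact ih A vT h1 h2 h4

lemma pvTryCol_none (T : List Nat) (rank : Nat) (col : List Int)
    (h : (List.range' rank ((T.map (pvDot col)).length - rank)).find?
      (fun i => (T.map (pvDot col)).getD i 0 != 0) = none) :
    pvTryCol T rank col = (T, rank) := by
  unfold pvTryCol; simp only [h]

lemma pvTryCol_some (T : List Nat) (rank : Nat) (col : List Int) (p : Nat)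
    (h : (List.range' rank ((T.map (pvDot col)).length - rank)).find?
      (fun i => (T.map (pvDot col)).getD i 0 != 0) = some p) :
    pvTryCol T rank col = (((List.range (T.map (pvDot col)).length).foldl (pvTryStep rank)
      (((T.map (pvDot col)).set rank ((T.map (pvDot col)).getD p 0)).set p
        ((T.map (pvDot col)).getD rank 0),
       (T.set rank (T.getD p 0)).set p (T.getD rank 0))).2, rank + 1) := by
  unfold pvTryCol; simp only [h]

lemma pvTryCol_stuck (nrows : Nat) (T : List Nat) (col : List Int) (hT : T.length = nrows) :
    pvTryCol T nrows col = (T, nrows) := by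
  apply pvTryCol_none
  rw [List.length_map, hT]
  simp

lemma pvTryFold_stuck (nrows : Nat) (cols : List (List Int)) :
    ∀ (T : List Nat), T.length = nrows →
    (cols.foldl (fun st col => pvTryCol st.1 st.2 col) (T, nrows)).2 = nrows := by
  induction cols with
  | nil => intro T _; rfl
  | cons col rest ih =>
    intro T hT
    rw [List.foldl_cons, pvTryCol_stuck nrows T col hT]
    exact ih T hT

lemma pvTryCol_rank_cases (T : List Nat) (rank : Nat) (col : List Int) :
    (pvTryCol T rank col).2 = rank ∨ (pvTryCol T rank col).2 = rank + 1 := by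
  cases h : (List.range' rank ((T.map (pvDot col)).length - rank)).find?
      (fun i => (T.map (pvDot col)).getD i 0 != 0) with
  | none => rw [pvTryCol_none T rank col h]; left; rfl
  | some p => rw [pvTryCol_some T rank col p h]; right; rfl

-- Core: the row-major elimination loop of A equals B's fold of pvTryCol over the columns.
lemma pvRankLoop_simT (nrows ncols : Nat) :
    ∀ (cols : List (List Int)) (c : Nat) (A : List (List Int)) (r : Nat) (T : List Nat),
      A.length = nrows →
      (∀ row ∈ A, row.length = ncols) →
      c + cols.length = ncols →
      T.length = nrows →
      (∀ (j : Nat) (h : j < cols.length), pvColOf A (c + j) = pvApplyT T cols[j]) →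
      pvRankLoop nrows (List.range' c cols.length) A r
        = (cols.foldl (fun st col => pvTryCol st.1 st.2 col) (T, r)).2 := by
  intro cols
  induction cols with
  | nil => intro c A r T _ _ _ _ _; rfl
  | cons col vs ih =>
    intro c A r T h1 h2 h3 hT h5
    have hvc : (T.map (pvDot col)) = pvColOf A c := by
      have := h5 0 (by simp); simpa [pvApplyT] using this.symm
    have hvlen : (T.map (pvDot col)).length = nrows := by simp [hT]
    have hpred : (fun i => (T.map (pvDot col)).getD i 0 != 0)
        = (fun i => (A.getD i []).getD c 0 != 0) := by
      funext i; rw [hvc, pvColOf_getD]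
    have hfold : ((col :: vs).foldl (fun st col => pvTryCol st.1 st.2 col) (T, r))
        = vs.foldl (fun st col => pvTryCol st.1 st.2 col) (pvTryCol T r col) := rfl
    have hrl : pvRankLoop nrows (List.range' c (col :: vs).length) A r
        = (match (List.range' r (nrows - r)).find? (fun i => (A.getD i []).getD c 0 != 0) with
          | none => pvRankLoop nrows (List.range' (c + 1) vs.length) A r
          | some p =>
            if r + 1 = nrows then r + 1
            else pvRankLoop nrows (List.range' (c + 1) vs.length)
              ((List.range nrows).foldl (pvElimStep r c)
                ((A.set r (A.getD p [])).set p (A.getD r []))) (r + 1)) := by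
      rw [List.length_cons, List.range'_succ]
      rfl
    rw [hrl, hfold]
    cases hF : (List.range' r (nrows - r)).find? (fun i => (A.getD i []).getD c 0 != 0) with
    | none =>
      have hF' : (List.range' r ((T.map (pvDot col)).length - r)).find?
          (fun i => (T.map (pvDot col)).getD i 0 != 0) = none := by
        rw [hvlen, hpred]; exact hF
      rw [pvTryCol_none T r col hF']
      simp only []
      exact ih (c + 1) A r T h1 h2 (by simp at h3; omega) hT
        (fun j hj => by
          have := h5 (j + 1) (by simpa using Nat.succ_lt_succ hj)
          rw [show c + (j + 1) = c + 1 + j by omega] at this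
          simpa using this)
    | some p =>
      have hF' : (List.range' r ((T.map (pvDot col)).length - r)).find?
          (fun i => (T.map (pvDot col)).getD i 0 != 0) = some p := by
        rw [hvlen, hpred]; exact hF
      rw [pvTryCol_some T r col p hF']
      simp only []
      have hpmem := List.mem_of_find?_eq_some hF
      have hpr : r ≤ p ∧ p < r + (nrows - r) := by
        have := List.mem_range'_1.mp hpmem; omega
      have hr : r < nrows := by omega
      have hp : p < nrows := by omega
      have hA1len : ((A.set r (A.getD p [])).set p (A.getD r [])).length = nrows := by
        simp [h1]
      have hA1rows : ∀ row ∈ (A.set r (A.getD p [])).set p (A.getD r []),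
          row.length = ncols := by
        intro row hrow
        rcases List.mem_or_eq_of_mem_set hrow with hmem | hmem
        · rcases List.mem_or_eq_of_mem_set hmem with hmem' | hmem'
          · exact h2 row hmem'
          · subst hmem'
            rw [List.getD_eq_getElem _ _ (by omega)]
            exact h2 _ (List.getElem_mem (by omega))
        · subst hmem
          rw [List.getD_eq_getElem _ _ (by omega)]
          exact h2 _ (List.getElem_mem (by omega))
      have hv1 : ((T.map (pvDot col)).set r ((T.map (pvDot col)).getD p 0)).set p
            ((T.map (pvDot col)).getD r 0)
          = pvColOf ((A.set r (A.getD p [])).set p (A.getD r [])) c := by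
        rw [hvc, pvColOf_swap]; rfl
      have hclt : c < ncols := by simp at h3; omega
      obtain ⟨e1, e2, -, e4, e5⟩ := pvElimFold_sim nrows ncols r c hclt (List.range nrows)
        ((A.set r (A.getD p [])).set p (A.getD r []))
        (((T.map (pvDot col)).set r ((T.map (pvDot col)).getD p 0)).set p
            ((T.map (pvDot col)).getD r 0),
         (T.set r (T.getD p 0)).set p (T.getD r 0))
        hA1len hA1rows hv1
      rw [hvlen]
      set A2 := (List.range nrows).foldl (pvElimStep r c)
        ((A.set r (A.getD p [])).set p (A.getD r [])) with hA2
      set T2 := ((List.range nrows).foldl (pvTryStep r)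
        (((T.map (pvDot col)).set r ((T.map (pvDot col)).getD p 0)).set p
            ((T.map (pvDot col)).getD r 0),
         (T.set r (T.getD p 0)).set p (T.getD r 0))).2 with hT2
      have hT2len : T2.length = nrows := by
        rw [hT2, e4]; simp [hT]
      have hinv2 : ∀ (j : Nat) (h : j < vs.length),
          pvColOf A2 (c + 1 + j) = pvApplyT T2 vs[j] := by
        intro j hj
        apply e5 (c + 1 + j) vs[j] (by omega) (by simp at h3; omega)
        have := h5 (j + 1) (by simpa using Nat.succ_lt_succ hj)
        rw [show c + (j + 1) = c + 1 + j by omega] at this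
        simp only [List.getElem_cons_succ] at this
        exact (show pvColOf ((A.set r (A.getD p [])).set p (A.getD r [])) (c + 1 + j)
            = pvApplyT ((T.set r (T.getD p 0)).set p (T.getD r 0)) vs[j] by
          rw [pvColOf_swap, this, ← pvApplyT_swap])
      by_cases hstop : r + 1 = nrows
      · rw [if_pos hstop]
        have hstuck : (vs.foldl (fun st col => pvTryCol st.1 st.2 col) (T2, r + 1)).2 = nrows := by
          rw [hstop]
          exact pvTryFold_stuck nrows vs T2 hT2len
        rw [hstuck, hstop]
      · rw [if_neg hstop]
        exact ih (c + 1) A2 (r + 1) T2 e1 e2 (by simp at h3 ⊢; omega) hT2len hinv2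

-- a column of the trial submatrix is the corresponding column of Z
lemma pvColOf_sub (Z : List (List Int)) (trial : List Nat) (j : Nat) (h : j < trial.length) :
    pvColOf (Z.map fun row => trial.map fun i => row.getD i 0) j = pvColOf Z trial[j] := by
  simp only [pvColOf, List.map_map]
  apply List.map_congr_left
  intro row _
  simp only [Function.comp]
  rw [List.getD_eq_getElem _ _ (by simpa using h), List.getElem_map]

-- per-candidate rank agreement: full re-elimination of A = one incremental mask step of B
lemma pvMatRank_stepT (Z : List (List Int)) (hZ : Z ≠ []) (trial : List Nat)
    (rank : Nat) (T : List Nat)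
    (hinv : (T, rank) = (trial.map (pvColOf Z)).foldl (fun st col => pvTryCol st.1 st.2 col)
      ((List.range Z.length).map fun i => (1 : Nat) <<< i, 0))
    (c : Nat) :
    pvMatRank (Z.map fun row => (trial ++ [c]).map fun j => row.getD j 0)
      = (pvTryCol T rank (pvColOf Z c)).2 := by
  unfold pvMatRank
  rw [if_neg (by simpa using hZ)]
  have hhead : ((Z.map fun row => (trial ++ [c]).map fun j => row.getD j 0).headD []).length
      = (trial ++ [c]).length := by
    rcases Z with - | ⟨z0, zs⟩
    · exact absurd rfl hZ
    · simp
  rw [hhead, List.length_map, List.range_eq_range']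
  have hsim := pvRankLoop_simT Z.length (trial ++ [c]).length
    ((trial ++ [c]).map (pvColOf Z)) 0
    (Z.map fun row => (trial ++ [c]).map fun j => row.getD j 0) 0
    ((List.range Z.length).map fun i => (1 : Nat) <<< i)
    (by simp)
    (by intro row hrow; rcases List.mem_map.mp hrow with ⟨w, -, rfl⟩; simp)
    (by simp)
    (by simp)
    (by
      intro j hj
      have hj' : j < (trial ++ [c]).length := by simpa using hj
      rw [Nat.zero_add, pvColOf_sub Z (trial ++ [c]) j hj', List.getElem_map,
          pvApplyT_id Z.length _ (pvColOf_length Z _)])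
  rw [List.length_map] at hsim
  rw [hsim, List.map_append, List.foldl_append, ← hinv]
  simp only [List.map_cons, List.map_nil, List.foldl_cons, List.foldl_nil]

-- signature extension = matrix over trial columns
lemma pvSigs_ext (Z : List (List Int)) (picked : List Nat) (c : Nat) :
    ((PySem.List.enumerate (Z.map fun row => picked.map fun j => row.getD j 0)).map fun p =>
        p.2 ++ [(Z.getD p.1.toNat []).getD c 0])
      = Z.map fun row => (picked ++ [c]).map fun j => row.getD j 0 := by
  apply List.ext_getElem
  · simp [PySem.List.length_enumerate]
  · intro i h1 h2
    simp only [List.getElem_map, PySem.List.getElem_enumerate, List.map_append, List.map_cons,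
      List.map_nil]
    have hi : i < Z.length := by simpa using h2
    have hz : Z[i]?.getD ([] : List Int) = Z[i] := by
      simp [List.getElem?_eq_getElem hi]
    simp [List.getD, hz]

lemma pvSigs_ext_col (Z : List (List Int)) (picked : List Nat) (c : Nat) :
    ((PySem.List.enumerate (Z.map fun row => picked.map fun j => row.getD j 0)).map fun p =>
        p.2 ++ [(pvColOf Z c).getD p.1.toNat 0])
      = Z.map fun row => (picked ++ [c]).map fun j => row.getD j 0 := by
  rw [show (fun p : Int × List Int => p.2 ++ [(pvColOf Z c).getD p.1.toNat 0])
      = fun p : Int × List Int => p.2 ++ [(Z.getD p.1.toNat []).getD c 0] from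
    funext fun p => by rw [pvColOf_getD]]
  exact pvSigs_ext Z picked c

lemma pvBetter_eq (bu : Nat) (bc : List Nat) (u : Nat) (cols : List Nat) :
    pvBetter (bu, bc) u cols = (if u > bu then u else bu, if u > bu then cols else bc) := by
  unfold pvBetter; split_ifs <;> rfl

lemma pvFirst_sim (Z : List (List Int)) (need : Int) (hZ : Z ≠ []) :
    ∀ (k c0 : Nat) (picked : List Nat) (T : List Nat) (rank bu : Nat) (bc : List Nat),
      (T, rank) = (picked.map (pvColOf Z)).foldl (fun st col => pvTryCol st.1 st.2 col)
        ((List.range Z.length).map fun i => (1 : Nat) <<< i, 0) →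
      pvBFirst Z need c0 ((List.range' c0 k).map (pvColOf Z)) picked T rank
        (Z.map fun row => picked.map fun j => row.getD j 0) (bu, bc)
        = ((pvAFirst Z need (List.range' c0 k) picked rank bu bc).1,
           (pvAFirst Z need (List.range' c0 k) picked rank bu bc).2.1,
           Z.map (fun row => (pvAFirst Z need (List.range' c0 k) picked rank bu bc).1.map
             fun j => row.getD j 0),
           (pvAFirst Z need (List.range' c0 k) picked rank bu bc).2.2.1,
           (pvAFirst Z need (List.range' c0 k) picked rank bu bc).2.2.2) := by
  intro k
  induction k with
  | zero => intro c0 picked T rank bu bc _; rfl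
  | succ k ihk =>
    intro c0 picked T rank bu bc hinv
    rw [List.range'_succ, List.map_cons]
    have hr : pvMatRank (Z.map fun row => (picked ++ [c0]).map fun j => row.getD j 0)
        = (pvTryCol T rank (pvColOf Z c0)).2 := pvMatRank_stepT Z hZ picked rank T hinv c0
    simp only [pvBFirst, pvAFirst, hr]
    by_cases heq : (pvTryCol T rank (pvColOf Z c0)).2 = rank
    · rw [if_pos heq, if_neg (by omega)]
      exact ihk (c0 + 1) picked T rank bu bc hinv
    · have hgt : (pvTryCol T rank (pvColOf Z c0)).2 > rank := by
        rcases pvTryCol_rank_cases T rank (pvColOf Z c0) with h | h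
        · exact absurd h heq
        · omega
      rw [if_neg heq, if_pos hgt, pvSigs_ext_col, pvBetter_eq]
      by_cases hbrk : (((picked ++ [c0]).length : Int) = need)
      · rw [if_pos hbrk, if_pos hbrk]
      · rw [if_neg hbrk, if_neg hbrk]
        have hinv' : ((pvTryCol T rank (pvColOf Z c0)).1, (pvTryCol T rank (pvColOf Z c0)).2)
            = ((picked ++ [c0]).map (pvColOf Z)).foldl (fun st col => pvTryCol st.1 st.2 col)
              ((List.range Z.length).map fun i => (1 : Nat) <<< i, 0) := by
          rw [List.map_append, List.foldl_append, ← hinv]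
          rfl
        exact ihk (c0 + 1) (picked ++ [c0]) _ _ _ _ hinv'

lemma pvSecond_sim (Z : List (List Int)) (Bn : Nat) (picked : List Nat) :
    ∀ (k c0 bu : Nat) (bc : List Nat),
      pvBSecond Bn (((List.range' c0 k).filter fun c => decide (c ∉ picked)).map
          fun c => (c, pvColOf Z c)) picked
        (Z.map fun row => picked.map fun j => row.getD j 0) (bu, bc)
        = pvASecond Z Bn (List.range' c0 k) picked bu bc := by
  intro k
  induction k with
  | zero => intro c0 bu bc; rfl
  | succ k ihk =>
    intro c0 bu bc
    rw [List.range'_succ]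
    by_cases hmem : c0 ∈ picked
    · rw [List.filter_cons_of_neg (by simpa using hmem)]
      simp only [pvASecond, if_pos hmem]
      exact ihk (c0 + 1) bu bc
    · rw [List.filter_cons_of_pos (by simpa using hmem), List.map_cons]
      simp only [pvASecond, pvBSecond, if_neg hmem, pvSigs_ext_col, pvBetter_eq]
      by_cases hdone : (if (PySem.Set.ofList (Z.map fun row =>
          (picked ++ [c0]).map fun j => row.getD j 0)).length > bu
            then (PySem.Set.ofList (Z.map fun row =>
              (picked ++ [c0]).map fun j => row.getD j 0)).length else bu) = Bn
      · rw [if_pos hdone, if_pos hdone]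
      · rw [if_neg hdone, if_neg hdone]
        exact ihk (c0 + 1) _ _

lemma pvEnumRange (f : Nat → List Int) :
    ∀ (k c0 : Nat), pvEnum c0 ((List.range' c0 k).map f)
      = (List.range' c0 k).map fun c => (c, f c) := by
  intro k
  induction k with
  | zero => intro c0; rfl
  | succ k ih =>
    intro c0
    rw [List.range'_succ, List.map_cons, List.map_cons]
    simp only [pvEnum]
    rw [ih (c0 + 1)]

-- ===== VERDICT (by name: the statement is the Claim_ definition above) =====
theorem select_unique_columns_spec : Claim_equal_select_unique_columns := by
  unfold Claim_equal_select_unique_columns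
  intro Z need _dom _pre
  unfold Spec_select_unique_columns
  by_cases hZ : Z = []
  · subst hZ; rfl
  · simp only [select_unique_columns, select_unique_columns_alt, if_neg hZ]
    have hcols : (fun c => Z.map fun row => row.getD c 0) = pvColOf Z := rfl
    have h0 : (Z.map fun (_ : List Int) => ([] : List Int))
        = Z.map fun row => ([] : List Nat).map fun j => row.getD j 0 := rfl
    have h1 := pvFirst_sim Z need hZ (Z.headD []).length 0 [] _ 0 0 [] rfl
    simp only at h1
    rw [hcols, List.range_eq_range', h0, h1]
    simp only []
    by_cases hcond : (pvAFirst Z need (List.range' 0 (Z.headD []).length) [] 0 0 []).2.2.1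
          < Z.length
        ∧ need ≤ ((pvAFirst Z need (List.range' 0 (Z.headD []).length) [] 0 0 []).2.1 : Int)
    · rw [if_pos hcond, if_pos hcond,
          pvEnumRange (pvColOf Z) (Z.headD []).length 0,
          List.filter_map,
          show ((fun p : Nat × List Int => decide (p.1 ∉
              (pvAFirst Z need (List.range' 0 (Z.headD []).length) [] 0 0 []).1)) ∘
            fun c => (c, pvColOf Z c))
            = fun c => decide (c ∉
              (pvAFirst Z need (List.range' 0 (Z.headD []).length) [] 0 0 []).1) from rfl,
          pvSecond_sim Z Z.length]
    · rw [if_neg hcond, if_neg hcond]
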